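-- pv_equiv track=rewrite | github.com/msexton1519/project_euler.py | project_euler.py | project_euler97
-- ===== SOURCE A (Python) =====
-- def project_euler97(num_digits=10):
--     num = 28433
--     power = 1
--     raised = 10 ** num_digits
--     while power <= 7830457:
--         num = (num * 2) % raised
--         power += 1
--     num += 1
--     return num
-- ===== SOURCE B (Python) =====
-- def project_euler97(num_digits=10):
--     raised = 10 ** num_digits
--     base, acc, e = 2, 1, 7830457
--     while e:
--         if e & 1:
--             acc = acc * base % raised
--         base = base * base % raised
--         e >>= 1
--     return 28433 * acc % raised + 1
-- ===== Notes on version B (the rewrite author's own statement) =====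
-- stated objective: faster
-- what changed: Replaces the 7830457-step doubling loop by binary exponentiation (square-and-multiply) of 2^7830457 mod 10**num_digits, then applies 28433* and %raised once before the final +1.
-- outside the precondition, e.g. on project_euler97(-1): A returns 1.099947039410472, B returns 1.0
import Mathlib
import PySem

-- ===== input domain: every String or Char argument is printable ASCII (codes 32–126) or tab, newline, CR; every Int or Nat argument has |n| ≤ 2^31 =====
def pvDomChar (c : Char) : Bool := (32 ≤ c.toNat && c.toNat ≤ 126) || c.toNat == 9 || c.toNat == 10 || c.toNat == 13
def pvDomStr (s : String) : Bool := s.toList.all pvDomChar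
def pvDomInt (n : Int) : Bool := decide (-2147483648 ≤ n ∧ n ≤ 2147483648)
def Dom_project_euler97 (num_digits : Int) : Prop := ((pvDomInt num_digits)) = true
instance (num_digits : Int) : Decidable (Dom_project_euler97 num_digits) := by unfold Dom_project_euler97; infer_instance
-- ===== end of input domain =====

-- B computes 2^7830457 mod 10**num_digits by square-and-multiply instead of A's 7830457 doubling steps (faster).

-- ===== PORT A =====
-- A's while loop: power runs 1..7830457, i.e. exactly 7830457 doubling-mod steps.
def pvALoop (raised : Int) : Nat → Int → Int
  | 0, num => num
  | k + 1, num => pvALoop raised k (num * 2 % raised)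

def project_euler97 (num_digits : Int) : Int :=
  let raised : Int := 10 ^ num_digits.toNat  -- Pre_ restricts to num_digits ≥ 0, where Python 10**num_digits is this integer
  pvALoop raised 7830457 28433 + 1

-- ===== PORT B =====
def pvBLoop (raised base acc : Int) (e : Nat) : Int :=
  if h : e = 0 then acc
  else pvBLoop raised (base * base % raised)
        (if e % 2 = 1 then acc * base % raised else acc) (e / 2)
  termination_by e
  decreasing_by exact Nat.div_lt_self (Nat.pos_of_ne_zero h) (by norm_num)

def project_euler97_alt (num_digits : Int) : Int :=
  let raised : Int := 10 ^ num_digits.toNat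
  28433 * pvBLoop raised 2 1 7830457 % raised + 1

-- ===== PRECONDITION & SPEC =====
-- Pre_ excludes negative num_digits: there Python's 10**num_digits is a float, so A returns a float
-- (e.g. 1.099947039410472), not a value of the declared Int type.
def Pre_project_euler97 (num_digits : Int) : Prop := 0 ≤ num_digits
instance (num_digits : Int) : Decidable (Pre_project_euler97 num_digits) := by unfold Pre_project_euler97; infer_instance
def pvWitness_project_euler97 : Int := (3)

def Spec_project_euler97 (num_digits : Int) (out : Int) : Prop := out = project_euler97_alt num_digits
instance (num_digits : Int) (out : Int) : Decidable (Spec_project_euler97 num_digits out) := by unfold Spec_project_euler97; infer_instance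

-- ===== CLAIM (what is proved, stated in full; the proofs are below) =====
def Claim_equal_project_euler97 : Prop := ∀ (num_digits : Int), Dom_project_euler97 num_digits → Pre_project_euler97 num_digits → Spec_project_euler97 num_digits (project_euler97 num_digits)

-- ===== LEMMAS AND PROOFS =====

-- A's loop computes num * 2^k mod raised (for at least one step).
theorem pvALoop_eq (r : Int) : ∀ (k : Nat) (num : Int), pvALoop r (k + 1) num = num * 2 ^ (k + 1) % r := by
  intro k
  induction k with
  | zero => intro num; simp [pvALoop]
  | succ k ih =>
    intro num
    calc pvALoop r (k + 1 + 1) num = pvALoop r (k + 1) (num * 2 % r) := rfl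
      _ = (num * 2 % r) * 2 ^ (k + 1) % r := ih _
      _ = (num * 2) * 2 ^ (k + 1) % r := by
            rw [Int.mul_emod, Int.emod_emod_of_dvd _ dvd_rfl, ← Int.mul_emod]
      _ = num * 2 ^ (k + 1 + 1) % r := by
            congr 1; rw [pow_succ]; ring

-- Modular-arithmetic helpers.
theorem pvMulEmodLeft (a b r : Int) : (a % r) * b % r = a * b % r := by
  rw [Int.mul_emod, Int.emod_emod_of_dvd _ dvd_rfl, ← Int.mul_emod]

theorem pvMulEmodRight (a b r : Int) : a * (b % r) % r = a * b % r := by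
  rw [Int.mul_emod, Int.emod_emod_of_dvd _ dvd_rfl, ← Int.mul_emod]

theorem pvPowEmod (a r : Int) (k : Nat) : (a % r) ^ k % r = a ^ k % r := by
  induction k with
  | zero => simp
  | succ k ih =>
    rw [pow_succ, pow_succ, Int.mul_emod, ih, ← Int.mul_emod, pvMulEmodRight]

-- B's loop computes acc * base^e mod raised for e ≠ 0.
theorem pvBLoop_eq (r : Int) : ∀ (e : Nat), e ≠ 0 → ∀ (base acc : Int), pvBLoop r base acc e = acc * base ^ e % r := by
  intro e
  induction e using Nat.strong_induction_on with
  | _ e ih =>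
    intro he base acc
    rw [pvBLoop, dif_neg he]
    by_cases h2 : e / 2 = 0
    · have he1 : e = 1 := by omega
      subst he1
      simp [pvBLoop]
    · have hlt : e / 2 < e := Nat.div_lt_self (Nat.pos_of_ne_zero he) (by norm_num)
      rw [ih (e / 2) hlt h2]
      by_cases ho : e % 2 = 1
      · rw [if_pos ho, pvMulEmodLeft, Int.mul_emod, pvPowEmod, ← Int.mul_emod]
        obtain ⟨k, hk⟩ : ∃ k, e / 2 = k := ⟨e / 2, rfl⟩
        rw [hk]
        have hee : e = 2 * k + 1 := by omega
        subst hee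
        congr 1
        rw [pow_add, pow_mul, pow_one, sq]; ring
      · rw [if_neg ho, Int.mul_emod, pvPowEmod, ← Int.mul_emod]
        obtain ⟨k, hk⟩ : ∃ k, e / 2 = k := ⟨e / 2, rfl⟩
        rw [hk]
        have hee : e = 2 * k := by omega
        subst hee
        congr 1
        rw [pow_mul, sq]

-- ===== VERDICT (by name: the statement is the Claim_ definition above) =====
theorem project_euler97_spec : Claim_equal_project_euler97 := by
  intro n _ _
  unfold Spec_project_euler97 project_euler97 project_euler97_alt
  show pvALoop (10 ^ n.toNat) (7830456 + 1) 28433 + 1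
     = 28433 * pvBLoop (10 ^ n.toNat) 2 1 7830457 % (10 ^ n.toNat) + 1
  rw [pvALoop_eq, pvBLoop_eq _ 7830457 (by norm_num), one_mul, pvMulEmodRight]
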